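-- pv_equiv track=rewrite | github.com/juandzambrano21/gaia | src/examples/gaia_language_modeling_refactored.py | create_sample_dataset
-- ===== SOURCE A (Python) =====
-- from typing import List, Tuple, Dict, Optional, Any
--
-- def create_sample_dataset(size: int = 50) -> List[str]:
--     """Create a simple sample dataset to avoid memory issues."""
--     sample_texts = [
--         "The quick brown fox jumps over the lazy dog.",
--         "Machine learning is transforming the world.",
--         "Natural language processing enables computers to understand text.",
--         "Deep learning models can learn complex patterns.",
--         "Artificial intelligence is the future of technology.",
--         "Data science combines statistics and programming.",
--         "Neural networks are inspired by the human brain.",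
--         "Computer vision allows machines to see and interpret images.",
--         "Reinforcement learning teaches agents through trial and error.",
--         "Big data requires powerful computational resources."
--     ]
--
--     # Repeat and extend the sample texts to reach desired size
--     texts = []
--     for i in range(size):
--         texts.append(sample_texts[i % len(sample_texts)])
--
--     return texts
-- ===== SOURCE B (Python) =====
-- from typing import List
--
-- def create_sample_dataset(size: int = 50) -> List[str]:
--     """Create a simple sample dataset to avoid memory issues."""
--     sample_texts = [
--         "The quick brown fox jumps over the lazy dog.",
--         "Machine learning is transforming the world.",
--         "Natural language processing enables computers to understand text.",
--         "Deep learning models can learn complex patterns.",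
--         "Artificial intelligence is the future of technology.",
--         "Data science combines statistics and programming.",
--         "Neural networks are inspired by the human brain.",
--         "Computer vision allows machines to see and interpret images.",
--         "Reinforcement learning teaches agents through trial and error.",
--         "Big data requires powerful computational resources."
--     ]
--     texts = []
--     remaining = size
--     while remaining >= len(sample_texts):
--         texts.extend(sample_texts)
--         remaining -= len(sample_texts)
--     if remaining > 0:
--         texts.extend(sample_texts[:remaining])
--     return texts
-- ===== Notes on version B (the rewrite author's own statement) =====
-- stated objective: alternative
-- what changed: Replaces the per-element modulo-indexed append loop with whole-block accumulation: a loop extends the result by the entire sample list while a full block still fits, then one partial slice appends the remainder.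
import Mathlib
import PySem

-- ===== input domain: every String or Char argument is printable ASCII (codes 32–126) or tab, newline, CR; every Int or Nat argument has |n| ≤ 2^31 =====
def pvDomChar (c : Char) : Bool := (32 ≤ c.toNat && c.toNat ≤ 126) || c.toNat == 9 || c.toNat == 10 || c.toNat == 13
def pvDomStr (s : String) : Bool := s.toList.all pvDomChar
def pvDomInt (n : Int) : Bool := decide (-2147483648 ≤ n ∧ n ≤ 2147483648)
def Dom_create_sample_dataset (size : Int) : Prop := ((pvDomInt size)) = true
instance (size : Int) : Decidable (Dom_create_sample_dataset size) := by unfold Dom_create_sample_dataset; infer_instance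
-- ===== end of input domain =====

-- B replaces the per-element modulo-indexed append loop with whole-block accumulation plus one partial slice (alternative decomposition; same cost).

-- the fixed sample texts (the identical literal list appears in both Pythons)
def pvSampleTexts : List String := [
  "The quick brown fox jumps over the lazy dog.",
  "Machine learning is transforming the world.",
  "Natural language processing enables computers to understand text.",
  "Deep learning models can learn complex patterns.",
  "Artificial intelligence is the future of technology.",
  "Data science combines statistics and programming.",
  "Neural networks are inspired by the human brain.",
  "Computer vision allows machines to see and interpret images.",
  "Reinforcement learning teaches agents through trial and error.",
  "Big data requires powerful computational resources."]

-- ===== PORT A =====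
-- texts = []; for i in range(size): texts.append(sample_texts[i % len(sample_texts)])
def create_sample_dataset (size : Int) : List String :=
  (PySem.List.pyRange 0 size 1).foldl
    (fun texts i => texts ++ [PySem.List.pyGetD pvSampleTexts (PySem.Int.mod i (pvSampleTexts.length : Int)) ""]) []

-- ===== PORT B =====
-- while remaining >= len(sample_texts): texts.extend(sample_texts); remaining -= len(sample_texts)
def pvBlockLoop (texts : List String) (remaining : Int) : List String × Int :=
  if h : (pvSampleTexts.length : Int) ≤ remaining then
    pvBlockLoop (texts ++ pvSampleTexts) (remaining - (pvSampleTexts.length : Int))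
  else (texts, remaining)
termination_by remaining.toNat
decreasing_by simp only [pvSampleTexts, List.length] at h ⊢; omega

-- if remaining > 0: texts.extend(sample_texts[:remaining])
def create_sample_dataset_alt (size : Int) : List String :=
  let (texts, remaining) := pvBlockLoop [] size
  if 0 < remaining then texts ++ PySem.List.slice pvSampleTexts none (some remaining) else texts

-- ===== PRECONDITION & SPEC =====
def Spec_create_sample_dataset (size : Int) (out : List String) : Prop := out = create_sample_dataset_alt size
instance (size : Int) (out : List String) : Decidable (Spec_create_sample_dataset size out) := by unfold Spec_create_sample_dataset; infer_instance

-- ===== CLAIM (what is proved, stated in full; the proofs are below) =====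
def Claim_equal_create_sample_dataset : Prop := ∀ (size : Int), Dom_create_sample_dataset size → Spec_create_sample_dataset size (create_sample_dataset size)

-- ===== LEMMAS AND PROOFS =====

-- the common normal form: the cyclic prefix of length n
def pvCyc (n : Int) : List String :=
  (List.range n.toNat).map (fun k => pvSampleTexts.getD (k % 10) "")

theorem pvA_as_map (size : Int) :
    create_sample_dataset size = pvCyc size := by
  unfold create_sample_dataset pvCyc
  rw [PySem.List.foldl_append_singleton_eq_map, PySem.List.pyRange_one]
  simp only [List.map_map, Int.sub_zero]
  refine List.map_congr_left (fun k _ => ?_)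
  have h1 : PySem.Int.mod ((0 : Int) + (k : Int)) ((pvSampleTexts.length : Nat) : Int)
      = ((k % pvSampleTexts.length : Nat) : Int) := by
    rw [Int.zero_add]; exact PySem.Int.mod_natCast k pvSampleTexts.length
  simp only [Function.comp, h1, PySem.List.pyGetD_natCast]
  norm_num [pvSampleTexts]

theorem pvCyc_block (n : Int) (h : 10 ≤ n) :
    pvCyc n = pvSampleTexts ++ pvCyc (n - 10) := by
  unfold pvCyc
  have hn : n.toNat = 10 + (n - 10).toNat := by omega
  rw [hn, List.range_add, List.map_append, List.map_map]
  have h2 : List.map ((fun k => pvSampleTexts.getD (k % 10) "") ∘ fun x => 10 + x)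
      (List.range (n - 10).toNat)
      = List.map (fun k => pvSampleTexts.getD (k % 10) "") (List.range (n - 10).toNat) :=
    List.map_congr_left (fun k _ => by simp [Nat.add_mod_left])
  rw [h2]
  congr 1

theorem pvCyc_small (n : Int) (h0 : 0 < n) (h10 : n < 10) :
    pvCyc n = PySem.List.slice pvSampleTexts none (some n) := by
  rw [PySem.List.slice_to _ (by omega)]
  unfold pvCyc
  apply List.ext_getElem
  · simp [pvSampleTexts]; omega
  · intro i h1 h2
    simp only [List.length_map, List.length_range] at h1
    simp only [List.getElem_map, List.getElem_range, List.getElem_take]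
    rw [Nat.mod_eq_of_lt (by omega), List.getD_eq_getElem _ "" (by simp [pvSampleTexts]; omega)]

theorem pvBlockLoop_spec (m : Nat) : ∀ (texts : List String) (n : Int), n.toNat ≤ m →
    (let (t, r) := pvBlockLoop texts n
     if 0 < r then t ++ PySem.List.slice pvSampleTexts none (some r) else t)
      = texts ++ pvCyc n := by
  induction m with
  | zero =>
    intro texts n hm
    rw [pvBlockLoop]
    have h10 : ¬ ((pvSampleTexts.length : Int) ≤ n) := by
      simp only [pvSampleTexts, List.length]; omega
    rw [dif_neg h10]
    simp only
    have hn0 : n ≤ 0 := by omega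
    rw [if_neg (by omega)]
    have : pvCyc n = [] := by unfold pvCyc; simp; omega
    simp [this]
  | succ m ih =>
    intro texts n hm
    rw [pvBlockLoop]
    by_cases h10 : (pvSampleTexts.length : Int) ≤ n
    · rw [dif_pos h10]
      have hlen : (pvSampleTexts.length : Int) = 10 := by norm_num [pvSampleTexts]
      rw [hlen] at h10 ⊢
      rw [ih (texts ++ pvSampleTexts) (n - 10) (by omega),
          pvCyc_block n h10, List.append_assoc]
    · rw [dif_neg h10]
      have hlen : ¬ ((10 : Int) ≤ n) := by simpa [pvSampleTexts] using h10
      simp only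
      by_cases hpos : 0 < n
      · rw [if_pos hpos, pvCyc_small n hpos (by omega)]
      · rw [if_neg hpos]
        have : pvCyc n = [] := by unfold pvCyc; simp; omega
        simp [this]

-- ===== VERDICT (by name: the statement is the Claim_ definition above) =====
theorem create_sample_dataset_spec : Claim_equal_create_sample_dataset := by
  intro size _
  unfold Spec_create_sample_dataset create_sample_dataset_alt
  have h := pvBlockLoop_spec size.toNat [] size le_rfl
  rw [pvA_as_map]
  rcases hbl : pvBlockLoop [] size with ⟨t, r⟩
  simp only [hbl] at h ⊢
  simpa using h.symm
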